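-- pv_equiv track=rewrite | github.com/s-shindeldecker/wellness-hub-demo | server/app.py | determine_user_segment
-- ===== SOURCE A (Python) =====
-- def determine_user_segment(user_data):
--     # Simple logic to determine user segment based on interests
--     interests = user_data.get('interests', [])
--
--     if any(interest in ["HIIT", "Strength Training", "Personal Training"] for interest in interests):
--         return "fitness_enthusiast"
--     elif any(interest in ["Yoga", "Meditation"] for interest in interests):
--         return "wellness_seeker"
--     elif any(interest in ["Massage", "Aromatherapy"] for interest in interests):
--         return "stress_relief"
--     else:
--         return "new_to_wellness"
-- ===== SOURCE B (Python) =====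
-- _RANK = {
--     "HIIT": 0, "Strength Training": 0, "Personal Training": 0,
--     "Yoga": 1, "Meditation": 1,
--     "Massage": 2, "Aromatherapy": 2,
-- }
-- _NAMES = ["fitness_enthusiast", "wellness_seeker", "stress_relief", "new_to_wellness"]
--
-- def determine_user_segment(user_data):
--     # Single indexed pass: keep the minimum priority rank seen (3 = no match).
--     best = 3
--     for interest in user_data.get('interests', []):
--         r = _RANK.get(interest, 3)
--         if r < best:
--             best = r
--     return _NAMES[best]
-- ===== Notes on version B (the rewrite author's own statement) =====
-- stated objective: alternative
-- what changed: Replaces the three sequential any-over-group-list scans with one dict mapping each interest to its segment's priority rank and a single pass keeping the minimum rank, mapped back to the segment name at the end.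
import Mathlib
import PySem

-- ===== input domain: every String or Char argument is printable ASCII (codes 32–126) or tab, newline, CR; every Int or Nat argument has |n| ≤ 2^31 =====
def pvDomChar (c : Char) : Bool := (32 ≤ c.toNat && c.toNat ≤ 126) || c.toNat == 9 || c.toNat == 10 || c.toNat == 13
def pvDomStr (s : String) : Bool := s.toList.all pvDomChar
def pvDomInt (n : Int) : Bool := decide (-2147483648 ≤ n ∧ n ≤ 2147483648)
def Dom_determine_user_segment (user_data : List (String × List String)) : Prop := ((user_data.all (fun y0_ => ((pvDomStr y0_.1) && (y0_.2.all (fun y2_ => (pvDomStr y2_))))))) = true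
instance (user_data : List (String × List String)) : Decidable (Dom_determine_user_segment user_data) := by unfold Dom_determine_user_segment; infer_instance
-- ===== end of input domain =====

-- B replaces A's three sequential group-membership scans with one rank dict and a single minimum-rank pass (objective: alternative).
-- ===== PORT A =====
def determine_user_segment (user_data : List (String × List String)) : String :=
  let interests := (PySem.Dict.mk user_data).getD "interests" []
  if interests.any (fun interest => ["HIIT", "Strength Training", "Personal Training"].contains interest) then
    "fitness_enthusiast"
  else if interests.any (fun interest => ["Yoga", "Meditation"].contains interest) then
    "wellness_seeker"
  else if interests.any (fun interest => ["Massage", "Aromatherapy"].contains interest) then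
    "stress_relief"
  else
    "new_to_wellness"

-- ===== PORT B =====
def pvRankDict : PySem.Dict String Nat :=
  PySem.Dict.mk [("HIIT", 0), ("Strength Training", 0), ("Personal Training", 0),
                 ("Yoga", 1), ("Meditation", 1), ("Massage", 2), ("Aromatherapy", 2)]

def pvNames : List String := ["fitness_enthusiast", "wellness_seeker", "stress_relief", "new_to_wellness"]

def determine_user_segment_alt (user_data : List (String × List String)) : String :=
  let best := ((PySem.Dict.mk user_data).getD "interests" []).foldl
    (fun best interest =>
      let r := pvRankDict.getD interest 3
      if r < best then r else best) 3
  -- best is always ≤ 3, so the Python index _NAMES[best] never raises; getD with "" is exact here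
  pvNames.getD best ""

-- ===== PRECONDITION & SPEC =====
def Spec_determine_user_segment (user_data : List (String × List String)) (out : String) : Prop := out = determine_user_segment_alt user_data
instance (user_data : List (String × List String)) (out : String) : Decidable (Spec_determine_user_segment user_data out) := by unfold Spec_determine_user_segment; infer_instance

-- ===== CLAIM (what is proved, stated in full; the proofs are below) =====
def Claim_equal_determine_user_segment : Prop := ∀ (user_data : List (String × List String)), Dom_determine_user_segment user_data → Spec_determine_user_segment user_data (determine_user_segment user_data)

-- ===== LEMMAS AND PROOFS =====

def pvARank (xs : List String) : Nat :=
  if xs.any (fun i => ["HIIT", "Strength Training", "Personal Training"].contains i) then 0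
  else if xs.any (fun i => ["Yoga", "Meditation"].contains i) then 1
  else if xs.any (fun i => ["Massage", "Aromatherapy"].contains i) then 2
  else 3

lemma pvRank_char (i : String) : pvRankDict.getD i 3 =
    (if i = "HIIT" ∨ i = "Strength Training" ∨ i = "Personal Training" then 0
     else if i = "Yoga" ∨ i = "Meditation" then 1
     else if i = "Massage" ∨ i = "Aromatherapy" then 2 else 3) := by
  simp only [pvRankDict, PySem.Dict.getD, PySem.Dict.get?_mk_cons, beq_iff_eq]
  by_cases h1 : i = "HIIT" <;> by_cases h2 : i = "Strength Training" <;>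
    by_cases h3 : i = "Personal Training" <;> by_cases h4 : i = "Yoga" <;>
    by_cases h5 : i = "Meditation" <;> by_cases h6 : i = "Massage" <;>
    by_cases h7 : i = "Aromatherapy" <;> simp_all [eq_comm, PySem.Dict.get?, List.find?]

lemma pvARank_cons (i : String) (rest : List String) :
    pvARank (i :: rest) = min (pvRankDict.getD i 3) (pvARank rest) := by
  rw [pvRank_char]
  simp only [pvARank, List.any_cons, List.contains_cons, List.contains_nil,
    Bool.or_false, Bool.or_eq_true, beq_iff_eq]
  split_ifs <;> simp_all <;> omega

lemma pvRank_le (i : String) : pvRankDict.getD i 3 ≤ 3 := by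
  rw [pvRank_char]; split_ifs <;> omega

lemma pvFold_min (xs : List String) : ∀ b : Nat, b ≤ 3 →
    xs.foldl (fun best interest =>
      let r := pvRankDict.getD interest 3
      if r < best then r else best) b = min b (pvARank xs) := by
  induction xs with
  | nil => intro b hb; simp [pvARank]; omega
  | cons i rest ih =>
    intro b hb
    have hr : pvRankDict.getD i 3 ≤ 3 := pvRank_le i
    simp only [List.foldl_cons]
    rw [ih _ (by split_ifs <;> omega), pvARank_cons]
    split_ifs <;> omega

-- ===== VERDICT (by name: the statement is the Claim_ definition above) =====
theorem determine_user_segment_spec : Claim_equal_determine_user_segment := by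
  intro user_data _
  unfold Spec_determine_user_segment determine_user_segment determine_user_segment_alt
  dsimp only
  rw [pvFold_min _ 3 (by omega)]
  unfold pvARank
  split_ifs <;> rfl
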